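-- pv_equiv track=rewrite | github.com/jackjamend/pi-lidar-opflow | adv_opt_flow.py | create_fill_in_array
-- ===== SOURCE A (Python) =====
-- def create_fill_in_array(rect_corners, points):
--     rect_fill = []
--     for rect in rect_corners:
--         for point in points:
--             px, py = point
--             rx1, ry1, rx2, ry2 = rect
--             if px >= rx1 and px <= rx2 and py >= ry1 and py <= ry2:
--                 rect_fill.append(rect)
--                 break
--     return rect_fill
-- ===== SOURCE B (Python) =====
-- def _bisect_left_x(xs, target):
--     lo, hi = 0, len(xs)
--     while lo < hi:
--         mid = (lo + hi) // 2
--         if xs[mid] < target: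
--             lo = mid + 1
--         else:
--             hi = mid
--     return lo
--
--
-- def create_fill_in_array(rect_corners, points):
--     pts = sorted(points, key=lambda p: p[0])
--     xs = [p[0] for p in pts]
--     out = []
--     for rect in rect_corners:
--         rx1, ry1, rx2, ry2 = rect
--         for px, py in pts[_bisect_left_x(xs, rx1):]:
--             if px > rx2:
--                 break
--             if ry1 <= py <= ry2:
--                 out.append(rect)
--                 break
--     return out
-- ===== Notes on version B (the rewrite author's own statement) =====
-- stated objective: faster
-- what changed: B sorts the points by x once, and for each rectangle binary-searches the first point with x >= rx1 and scans only until x exceeds rx2, instead of A's full scan of all points per rectangle.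
import Mathlib
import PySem

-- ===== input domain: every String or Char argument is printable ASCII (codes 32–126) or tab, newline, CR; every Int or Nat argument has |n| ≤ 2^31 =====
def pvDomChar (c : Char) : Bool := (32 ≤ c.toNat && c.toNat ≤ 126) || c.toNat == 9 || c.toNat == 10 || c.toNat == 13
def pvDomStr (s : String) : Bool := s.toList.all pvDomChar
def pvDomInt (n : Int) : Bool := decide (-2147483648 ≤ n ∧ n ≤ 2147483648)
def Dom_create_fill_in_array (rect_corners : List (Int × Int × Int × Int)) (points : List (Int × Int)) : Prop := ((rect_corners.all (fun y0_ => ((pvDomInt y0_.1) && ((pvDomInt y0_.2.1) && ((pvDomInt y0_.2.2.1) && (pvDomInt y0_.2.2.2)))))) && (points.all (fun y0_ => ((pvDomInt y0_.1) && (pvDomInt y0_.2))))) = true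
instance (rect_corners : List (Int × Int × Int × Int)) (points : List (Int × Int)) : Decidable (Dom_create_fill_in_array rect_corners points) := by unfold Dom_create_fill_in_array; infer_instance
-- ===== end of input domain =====

-- B sorts the points by x once, binary-searches the first candidate point per rectangle and
-- stops the scan once x exceeds the rectangle's right edge, instead of A's full scan per rectangle.

-- ===== PORT A =====
-- inner 'for point in points: … break' loop of A
def pvInnerA (rx1 ry1 rx2 ry2 : Int) : List (Int × Int) → Bool
  | [] => false
  | (px, py) :: rest =>
    if px ≥ rx1 ∧ px ≤ rx2 ∧ py ≥ ry1 ∧ py ≤ ry2 then true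
    else pvInnerA rx1 ry1 rx2 ry2 rest

def create_fill_in_array (rect_corners : List (Int × Int × Int × Int)) (points : List (Int × Int)) : List (Int × Int × Int × Int) :=
  rect_corners.foldl
    (fun acc rect =>
      if pvInnerA rect.1 rect.2.1 rect.2.2.1 rect.2.2.2 points then acc ++ [rect] else acc)
    []

-- ===== PORT B =====
-- hand-written bisect_left on the x-list (Source B's _bisect_left_x; while loop as recursion on lo/hi)
def pvBlx (xs : List Int) (target : Int) (lo hi : Nat) : Nat :=
  if lo < hi then
    let mid := (lo + hi) / 2
    if xs.getD mid 0 < target then pvBlx xs target (mid + 1) hi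
    else pvBlx xs target lo mid
  else lo
termination_by hi - lo
decreasing_by all_goals omega

-- inner 'for px, py in pts[i:]: … break' loop of B
def pvInnerB (rx2 ry1 ry2 : Int) : List (Int × Int) → Bool
  | [] => false
  | (px, py) :: rest =>
    if px > rx2 then false
    else if ry1 ≤ py ∧ py ≤ ry2 then true
    else pvInnerB rx2 ry1 ry2 rest

def create_fill_in_array_alt (rect_corners : List (Int × Int × Int × Int)) (points : List (Int × Int)) : List (Int × Int × Int × Int) :=
  let pts := PySem.List.sorted points (fun p => p.1) false
  let xs := pts.map (fun p => p.1)
  rect_corners.foldl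
    (fun acc rect =>
      if pvInnerB rect.2.2.1 rect.2.1 rect.2.2.2
          (PySem.List.slice pts (some ((pvBlx xs rect.1 0 xs.length : Nat) : Int)) none)
      then acc ++ [rect] else acc)
    []

-- ===== PRECONDITION & SPEC =====
def Spec_create_fill_in_array (rect_corners : List (Int × Int × Int × Int)) (points : List (Int × Int)) (out : List (Int × Int × Int × Int)) : Prop := out = create_fill_in_array_alt rect_corners points
instance (rect_corners : List (Int × Int × Int × Int)) (points : List (Int × Int)) (out : List (Int × Int × Int × Int)) : Decidable (Spec_create_fill_in_array rect_corners points out) := by unfold Spec_create_fill_in_array; infer_instance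

-- ===== CLAIM (what is proved, stated in full; the proofs are below) =====
def Claim_equal_create_fill_in_array : Prop := ∀ (rect_corners : List (Int × Int × Int × Int)) (points : List (Int × Int)), Dom_create_fill_in_array rect_corners points → Spec_create_fill_in_array rect_corners points (create_fill_in_array rect_corners points)

-- ===== LEMMAS AND PROOFS =====

def pvInRect (rx1 ry1 rx2 ry2 : Int) (p : Int × Int) : Bool :=
  decide (rx1 ≤ p.1 ∧ p.1 ≤ rx2 ∧ ry1 ≤ p.2 ∧ p.2 ≤ ry2)

lemma pvInnerA_eq_any (rx1 ry1 rx2 ry2 : Int) (l : List (Int × Int)) :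
    pvInnerA rx1 ry1 rx2 ry2 l = l.any (pvInRect rx1 ry1 rx2 ry2) := by
  induction l with
  | nil => rfl
  | cons p rest ih =>
    obtain ⟨px, py⟩ := p
    simp only [pvInnerA, List.any_cons, ih, pvInRect]
    by_cases h : px ≥ rx1 ∧ px ≤ rx2 ∧ py ≥ ry1 ∧ py ≤ ry2
    · have h' : rx1 ≤ px ∧ px ≤ rx2 ∧ ry1 ≤ py ∧ py ≤ ry2 := by tauto
      simp [h]
    · have h' : ¬ (rx1 ≤ px ∧ px ≤ rx2 ∧ ry1 ≤ py ∧ py ≤ ry2) := by tauto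
      simp [h]

lemma pvBlx_bounds (xs : List Int) (t : Int) (lo hi : Nat) (h : lo ≤ hi) :
    lo ≤ pvBlx xs t lo hi ∧ pvBlx xs t lo hi ≤ hi := by
  induction lo, hi using pvBlx.induct xs t with
  | case1 lo hi hlt mid hm ih =>
    have hmid : mid = (lo + hi) / 2 := rfl
    rw [hmid] at hm ih
    clear hmid
    rw [pvBlx]; simp only [if_pos hlt, if_pos hm]
    have := ih (by omega); omega
  | case2 lo hi hlt mid hm ih =>
    have hmid : mid = (lo + hi) / 2 := rfl
    rw [hmid] at hm ih
    clear hmid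
    rw [pvBlx]; simp only [if_pos hlt, if_neg hm]
    have := ih (by omega); omega
  | case3 lo hi hlt => rw [pvBlx]; simp only [if_neg hlt]; omega

lemma pvGetD_mono (xs : List Int) (hs : xs.Pairwise (· ≤ ·)) {i j : Nat}
    (hij : i ≤ j) (hj : j < xs.length) : xs.getD i 0 ≤ xs.getD j 0 := by
  rw [List.getD_eq_getElem xs 0 (by omega), List.getD_eq_getElem xs 0 hj]
  rcases Nat.lt_or_ge i j with h | h
  · exact List.pairwise_iff_getElem.mp hs i j (by omega) hj h
  · have : i = j := by omega
    subst this; exact le_refl _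

lemma pvBlx_lt (xs : List Int) (t : Int) (lo hi : Nat)
    (hhi : hi ≤ xs.length) (hs : xs.Pairwise (· ≤ ·)) :
    ∀ j, lo ≤ j → j < pvBlx xs t lo hi → xs.getD j 0 < t := by
  induction lo, hi using pvBlx.induct xs t with
  | case1 lo hi hlt mid hm ih =>
    have hmid : mid = (lo + hi) / 2 := rfl
    rw [hmid] at hm ih
    clear hmid
    intro j hj1 hj2
    rw [pvBlx] at hj2; simp only [if_pos hlt, if_pos hm] at hj2
    rcases Nat.lt_or_ge j ((lo + hi) / 2 + 1) with h | h
    · exact lt_of_le_of_lt (pvGetD_mono xs hs (by omega) (by omega)) hm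
    · exact ih hhi j h hj2
  | case2 lo hi hlt mid hm ih =>
    have hmid : mid = (lo + hi) / 2 := rfl
    rw [hmid] at hm ih
    clear hmid
    intro j hj1 hj2
    rw [pvBlx] at hj2; simp only [if_pos hlt, if_neg hm] at hj2
    exact ih (by omega) j hj1 hj2
  | case3 lo hi hlt =>
    intro j hj1 hj2
    rw [pvBlx] at hj2; simp only [if_neg hlt] at hj2; omega

lemma pvBlx_ge (xs : List Int) (t : Int) (lo hi : Nat)
    (hhi : hi ≤ xs.length) (hs : xs.Pairwise (· ≤ ·)) :
    ∀ j, pvBlx xs t lo hi ≤ j → j < hi → t ≤ xs.getD j 0 := by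
  induction lo, hi using pvBlx.induct xs t with
  | case1 lo hi hlt mid hm ih =>
    have hmid : mid = (lo + hi) / 2 := rfl
    rw [hmid] at hm ih
    clear hmid
    intro j hj1 hj2
    rw [pvBlx] at hj1; simp only [if_pos hlt, if_pos hm] at hj1
    exact ih hhi j hj1 hj2
  | case2 lo hi hlt mid hm ih =>
    have hmid : mid = (lo + hi) / 2 := rfl
    rw [hmid] at hm ih
    clear hmid
    intro j hj1 hj2
    rw [pvBlx] at hj1; simp only [if_pos hlt, if_neg hm] at hj1
    rcases Nat.lt_or_ge j ((lo + hi) / 2) with h | h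
    · exact ih (by omega) j hj1 h
    · exact le_trans (not_lt.mp hm) (pvGetD_mono xs hs h (by omega))
  | case3 lo hi hlt =>
    intro j hj1 hj2
    rw [pvBlx] at hj1; simp only [if_neg hlt] at hj1; omega
lemma pvInnerB_eq_any (rx1 ry1 rx2 ry2 : Int) (l : List (Int × Int))
    (hall : ∀ p ∈ l, rx1 ≤ p.1) (hs : l.Pairwise (fun a b => a.1 ≤ b.1)) :
    pvInnerB rx2 ry1 ry2 l = l.any (pvInRect rx1 ry1 rx2 ry2) := by
  induction l with
  | nil => rfl
  | cons p rest ih =>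
    obtain ⟨px, py⟩ := p
    rw [List.pairwise_cons] at hs
    have hhead : rx1 ≤ px := hall (px, py) (by simp)
    simp only [pvInnerB, List.any_cons]
    by_cases h1 : px > rx2
    · have : ∀ q ∈ rest, pvInRect rx1 ry1 rx2 ry2 q = false := by
        intro q hq
        have : px ≤ q.1 := hs.1 q hq
        simp [pvInRect]; omega
      rw [if_pos h1, List.any_eq_false.mpr (fun x hx => by simp [this x hx])]
      simp [pvInRect]; omega
    · rw [if_neg h1]
      by_cases h2 : ry1 ≤ py ∧ py ≤ ry2
      · have : pvInRect rx1 ry1 rx2 ry2 (px, py) = true := by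
          simp [pvInRect]; refine ⟨hhead, by omega, h2.1, h2.2⟩
        simp [if_pos h2, this]
      · have : pvInRect rx1 ry1 rx2 ry2 (px, py) = false := by
          simp [pvInRect]; intro _ _ hy1; exact not_le.mp (fun hle => h2 ⟨hy1, hle⟩)
        rw [if_neg h2, ih (fun q hq => hall q (by simp [hq])) hs.2]
        simp [this]

lemma pv_per_rect (rx1 ry1 rx2 ry2 : Int) (points : List (Int × Int)) :
    pvInnerA rx1 ry1 rx2 ry2 points =
      pvInnerB rx2 ry1 ry2
        (PySem.List.slice (PySem.List.sorted points (fun p => p.1) false)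
          (some (((pvBlx ((PySem.List.sorted points (fun p => p.1) false).map (fun p => p.1)) rx1 0
              ((PySem.List.sorted points (fun p => p.1) false).map (fun p => p.1)).length : Nat) : Int))) none) := by
  set s := PySem.List.sorted points (fun p => p.1) false with hsdef
  set xs := s.map (fun p => p.1) with hxs
  set i := pvBlx xs rx1 0 xs.length with hi
  have hlen : xs.length = s.length := by simp [hxs]
  have hxsp : xs.Pairwise (· ≤ ·) := PySem.List.sorted_map_key_pairwise points (fun p => p.1)
  have hsp : s.Pairwise (fun a b => a.1 ≤ b.1) := PySem.List.sorted_pairwise points (fun p => p.1)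
  have hperm : points.Perm s := (PySem.List.sorted_perm points (fun p => p.1) false).symm
  have hxget : ∀ (j : Nat) (hj : j < s.length), xs.getD j 0 = (s[j]).1 := by
    intro j hj
    rw [List.getD_eq_getElem xs 0 (by omega)]
    simp [hxs]
  rw [PySem.List.slice_from_natCast]
  rw [pvInnerA_eq_any, hperm.any_eq]
  have hib := pvBlx_bounds xs rx1 0 xs.length (by omega)
  -- drop the prefix: every point before index i has x < rx1, hence is not in the rectangle
  have htake : (s.take i).any (pvInRect rx1 ry1 rx2 ry2) = false := by
    rw [List.any_eq_false]
    intro p hp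
    obtain ⟨j, hm, hj⟩ := List.mem_take_iff_getElem.mp hp
    have hjlt : xs.getD j 0 < rx1 :=
      pvBlx_lt xs rx1 0 xs.length (le_refl _) hxsp j (by omega) (by omega)
    rw [hxget j (by omega), hj] at hjlt
    simp [pvInRect]; omega
  have hsplit : s.any (pvInRect rx1 ry1 rx2 ry2) = (s.drop i).any (pvInRect rx1 ry1 rx2 ry2) := by
    conv_lhs => rw [← List.take_append_drop i s]
    rw [List.any_append, htake]; simp
  rw [hsplit]
  refine (pvInnerB_eq_any rx1 ry1 rx2 ry2 (s.drop i) ?_ hsp.drop).symm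
  intro p hp
  obtain ⟨j, hj, hpj⟩ := List.mem_iff_getElem.mp hp
  have hlt : i + j < s.length := by
    have := hj; simp [List.length_drop] at this; omega
  have hge : rx1 ≤ xs.getD (i + j) 0 :=
    pvBlx_ge xs rx1 0 xs.length (le_refl _) hxsp (i + j) (by omega) (by omega)
  rw [hxget (i + j) hlt] at hge
  have : (List.drop i s)[j] = s[i + j] := List.getElem_drop
  rw [this] at hpj
  rw [← hpj]
  exact hge

-- ===== VERDICT (by name: the statement is the Claim_ definition above) =====
theorem create_fill_in_array_spec : Claim_equal_create_fill_in_array := by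
  intro rc pts _
  unfold Spec_create_fill_in_array create_fill_in_array create_fill_in_array_alt
  simp only []
  rw [PySem.List.foldl_append_if_eq_filter, PySem.List.foldl_append_if_eq_filter,
    List.nil_append, List.nil_append]
  exact List.filter_congr fun rect _ =>
    pv_per_rect rect.1 rect.2.1 rect.2.2.1 rect.2.2.2 pts
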